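-- pv_equiv track=rewrite | github.com/Ziad235/Text-Classification | Main.py | Categories_count
-- ===== SOURCE A (Python) =====
-- import copy
--
-- def Categories_count(givenSet):
--
--     categories = {}
--     for i in givenSet:
--         if i[1] not in categories:
--             categories[i[1]] = 1
--         else:
--             categories[i[1]] = categories[i[1]] + 1
--
--     Text_Corpus_Words = copy.deepcopy(categories)
--     for i in Text_Corpus_Words:
--         Text_Corpus_Words[i] = {}
--
--     for biography in givenSet:
--         for word in biography[2]:
--             if word not in Text_Corpus_Words[biography[1]]:
--                 Text_Corpus_Words[biography[1]][word] = 1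
--             else:
--                 Text_Corpus_Words[biography[1]
--                                   ][word] = Text_Corpus_Words[biography[1]][word] + 1
--     return categories, Text_Corpus_Words
-- ===== SOURCE B (Python) =====
-- def Categories_count(givenSet):
--     # Single pass: build both the category counts and the per-category word
--     # frequencies in one traversal (no deepcopy, no reset loop, no second scan).
--     categories = {}
--     word_freq = {}
--     for item in givenSet:
--         cat = item[1]
--         if cat not in categories:
--             categories[cat] = 1
--             word_freq[cat] = {}
--         else:
--             categories[cat] = categories[cat] + 1
--         wf = word_freq[cat]
--         for word in item[2]:
--             if word not in wf:
--                 wf[word] = 1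
--             else:
--                 wf[word] = wf[word] + 1
--     return categories, word_freq
-- ===== Notes on version B (the rewrite author's own statement) =====
-- stated objective: simpler
-- what changed: Builds both dicts in a single pass over givenSet (creating a category's empty word-dict at its first occurrence), instead of A's three stages: count loop, deepcopy+reset loop, and a second full scan.
import Mathlib
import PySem

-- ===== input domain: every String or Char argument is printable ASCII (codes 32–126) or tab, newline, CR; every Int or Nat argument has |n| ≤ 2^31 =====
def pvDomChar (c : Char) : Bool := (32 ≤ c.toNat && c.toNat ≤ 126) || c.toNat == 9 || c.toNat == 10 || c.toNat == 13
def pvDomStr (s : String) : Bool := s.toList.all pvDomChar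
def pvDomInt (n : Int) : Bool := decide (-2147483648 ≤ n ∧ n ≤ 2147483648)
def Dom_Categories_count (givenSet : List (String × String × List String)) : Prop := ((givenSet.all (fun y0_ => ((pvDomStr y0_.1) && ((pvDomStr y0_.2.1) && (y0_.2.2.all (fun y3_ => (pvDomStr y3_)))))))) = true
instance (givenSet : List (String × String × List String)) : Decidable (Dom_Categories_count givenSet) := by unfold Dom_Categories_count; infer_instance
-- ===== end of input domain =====

-- B builds both dicts in a single pass over givenSet (no deepcopy, no reset loop, no second scan); objective: simpler.

-- ===== PORT A =====
-- 'if word not in wd: wd[word] = 1 else: wd[word] = wd[word] + 1'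
def wstepA (wd : PySem.Dict String Int) (w : String) : PySem.Dict String Int :=
  if !(wd.contains w) then wd.insert w 1 else wd.insert w (wd.getD w 0 + 1)

def Categories_count (givenSet : List (String × String × List String)) : (List (String × Int)) × (List (String × List (String × Int))) :=
  -- first loop: category counts
  let categories : PySem.Dict String Int :=
    givenSet.foldl (fun d i => if !(d.contains i.2.1) then d.insert i.2.1 1 else d.insert i.2.1 (d.getD i.2.1 0 + 1)) PySem.Dict.empty
  -- 'Text_Corpus_Words = copy.deepcopy(categories)' then 'for i in ...: Text_Corpus_Words[i] = {}':
  -- same keys in the same positions, every value {} (typed directly, since Lean cannot retype the copied Int values)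
  let tw0 : PySem.Dict String (PySem.Dict String Int) :=
    PySem.Dict.mk (categories.items.map (fun p => (p.1, PySem.Dict.empty)))
  -- second scan: per biography, per word, update Text_Corpus_Words[biography[1]][word] in place
  let tw : PySem.Dict String (PySem.Dict String Int) :=
    givenSet.foldl (fun t i => i.2.2.foldl (fun t w => t.modify i.2.1 PySem.Dict.empty (fun wd => wstepA wd w)) t) tw0
  (categories.items, tw.items.map (fun p => (p.1, p.2.items)))

-- ===== PORT B =====
-- 'if word not in wf: wf[word] = 1 else: wf[word] = wf[word] + 1'
def wstepB (wd : PySem.Dict String Int) (w : String) : PySem.Dict String Int :=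
  if !(wd.contains w) then wd.insert w 1 else wd.insert w (wd.getD w 0 + 1)

-- the single-pass loop body of Source B
def bStep (st : PySem.Dict String Int × PySem.Dict String (PySem.Dict String Int))
    (i : String × String × List String) :
    PySem.Dict String Int × PySem.Dict String (PySem.Dict String Int) :=
  let cat := i.2.1
  let (c, t) :=
    if !(st.1.contains cat) then (st.1.insert cat 1, st.2.insert cat PySem.Dict.empty)
    else (st.1.insert cat (st.1.getD cat 0 + 1), st.2)
  -- 'wf = word_freq[cat]' then the word loop mutates wf in place
  (c, t.modify cat PySem.Dict.empty (fun wd => i.2.2.foldl wstepB wd))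

def Categories_count_alt (givenSet : List (String × String × List String)) : (List (String × Int)) × (List (String × List (String × Int))) :=
  let st := givenSet.foldl bStep (PySem.Dict.empty, PySem.Dict.empty)
  (st.1.items, st.2.items.map (fun p => (p.1, p.2.items)))

-- ===== PRECONDITION & SPEC =====
def Spec_Categories_count (givenSet : List (String × String × List String)) (out : (List (String × Int)) × (List (String × List (String × Int)))) : Prop := out = Categories_count_alt givenSet
instance (givenSet : List (String × String × List String)) (out : (List (String × Int)) × (List (String × List (String × Int)))) : Decidable (Spec_Categories_count givenSet out) := by unfold Spec_Categories_count; infer_instance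

-- ===== CLAIM (what is proved, stated in full; the proofs are below) =====
def Claim_equal_Categories_count : Prop := ∀ (givenSet : List (String × String × List String)), Dom_Categories_count givenSet → Spec_Categories_count givenSet (Categories_count givenSet)

-- ===== LEMMAS AND PROOFS =====

-- the category-count step both Pythons perform
def cstepF (d : PySem.Dict String Int) (i : String × String × List String) : PySem.Dict String Int :=
  if !(d.contains i.2.1) then d.insert i.2.1 1 else d.insert i.2.1 (d.getD i.2.1 0 + 1)

-- all words of items whose category is k, in traversal order
def wordsOf (gs : List (String × String × List String)) (k : String) : List String :=
  (gs.filter (fun i => i.2.1 == k)).flatMap (fun i => i.2.2)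

theorem wstep_eq : wstepA = wstepB := rfl

theorem cstepF_eq_insert (d : PySem.Dict String Int) (i : String × String × List String) :
    cstepF d i = d.insert i.2.1 (if !(d.contains i.2.1) then 1 else d.getD i.2.1 0 + 1) := by
  unfold cstepF; split <;> rfl

theorem bStep_fst (st : PySem.Dict String Int × PySem.Dict String (PySem.Dict String Int))
    (i : String × String × List String) : (bStep st i).1 = cstepF st.1 i := by
  unfold bStep cstepF
  cases h : st.1.contains i.2.1 <;> simp [h]

theorem bStep_snd_pos (c : PySem.Dict String Int) (t : PySem.Dict String (PySem.Dict String Int))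
    (i : String × String × List String) (h : c.contains i.2.1 = true) :
    (bStep (c, t) i).2 = t.modify i.2.1 PySem.Dict.empty (fun wd => i.2.2.foldl wstepB wd) := by
  unfold bStep; simp [h]

theorem bStep_snd_neg (c : PySem.Dict String Int) (t : PySem.Dict String (PySem.Dict String Int))
    (i : String × String × List String) (h : c.contains i.2.1 = false) :
    (bStep (c, t) i).2 = (t.insert i.2.1 PySem.Dict.empty).modify i.2.1 PySem.Dict.empty
      (fun wd => i.2.2.foldl wstepB wd) := by
  unfold bStep; simp [h]

theorem bfold_fst (gs : List (String × String × List String))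
    (st : PySem.Dict String Int × PySem.Dict String (PySem.Dict String Int)) :
    (gs.foldl bStep st).1 = gs.foldl cstepF st.1 := by
  induction gs generalizing st with
  | nil => rfl
  | cons i gs ih => simp only [List.foldl_cons, ih, bStep_fst]

theorem wordsOf_cons (i : String × String × List String)
    (gs : List (String × String × List String)) (k : String) :
    wordsOf (i :: gs) k = if i.2.1 = k then i.2.2 ++ wordsOf gs k else wordsOf gs k := by
  unfold wordsOf
  by_cases h : i.2.1 = k <;> simp [h]

-- inner word loop of A at a single biography: effect on getD
theorem innerA_getD (ws : List String) (t : PySem.Dict String (PySem.Dict String Int))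
    (cat k : String) :
    (ws.foldl (fun t w => t.modify cat PySem.Dict.empty (fun wd => wstepA wd w)) t).getD k PySem.Dict.empty
      = if k = cat then ws.foldl wstepA (t.getD cat PySem.Dict.empty) else t.getD k PySem.Dict.empty := by
  induction ws generalizing t with
  | nil => split <;> simp_all
  | cons w ws ih =>
    simp only [List.foldl_cons, ih, PySem.Dict.getD_modify]
    by_cases h : k = cat <;> simp [h]

-- inner word loop of A preserves keys and contains when the category is present
theorem innerA_keys (ws : List String) (t : PySem.Dict String (PySem.Dict String Int))
    (cat : String) (h : t.contains cat = true) :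
    (ws.foldl (fun t w => t.modify cat PySem.Dict.empty (fun wd => wstepA wd w)) t).keys = t.keys := by
  induction ws generalizing t with
  | nil => rfl
  | cons w ws ih =>
    simp only [List.foldl_cons]
    rw [ih]
    · rw [PySem.Dict.keys_modify, PySem.Dict.keys_insert_of_contains _ _ h]
    · rw [PySem.Dict.contains_modify]; simp

theorem contains_eq_of_keys_eq {t r : PySem.Dict String (PySem.Dict String Int)}
    (h : r.keys = t.keys) (j : String) : r.contains j = t.contains j := by
  rw [Bool.eq_iff_iff, PySem.Dict.contains_iff_mem_keys, PySem.Dict.contains_iff_mem_keys, h]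

-- outer loop of A: getD characterisation (unconditional)
theorem afold_getD (gs : List (String × String × List String))
    (t : PySem.Dict String (PySem.Dict String Int)) (k : String) :
    (gs.foldl (fun t i => i.2.2.foldl (fun t w => t.modify i.2.1 PySem.Dict.empty (fun wd => wstepA wd w)) t) t).getD k PySem.Dict.empty
      = (wordsOf gs k).foldl wstepA (t.getD k PySem.Dict.empty) := by
  induction gs generalizing t with
  | nil => rfl
  | cons i gs ih =>
    simp only [List.foldl_cons, ih, wordsOf_cons]
    by_cases h : i.2.1 = k
    · rw [if_pos h, List.foldl_append, innerA_getD, if_pos h.symm, h]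
    · rw [if_neg h, innerA_getD, if_neg (fun hk => h hk.symm)]

-- outer loop of A: keys preserved when every category is already a key
theorem afold_keys (gs : List (String × String × List String))
    (t : PySem.Dict String (PySem.Dict String Int))
    (h : ∀ i ∈ gs, t.contains i.2.1 = true) :
    (gs.foldl (fun t i => i.2.2.foldl (fun t w => t.modify i.2.1 PySem.Dict.empty (fun wd => wstepA wd w)) t) t).keys = t.keys := by
  induction gs generalizing t with
  | nil => rfl
  | cons i gs ih =>
    simp only [List.foldl_cons]
    have hkeys := innerA_keys i.2.2 t i.2.1 (h i (by simp))
    rw [ih _ (fun j hj => by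
      rw [contains_eq_of_keys_eq hkeys]; exact h j (by simp [hj])), hkeys]

-- single-pass loop of B: getD characterisation and keys, under the invariant
theorem bfold_snd (gs : List (String × String × List String))
    (c : PySem.Dict String Int) (t : PySem.Dict String (PySem.Dict String Int))
    (hinv : ∀ j, c.contains j = t.contains j) :
    (∀ k, ((gs.foldl bStep (c, t)).2).getD k PySem.Dict.empty
        = (wordsOf gs k).foldl wstepB (t.getD k PySem.Dict.empty))
    ∧ ((gs.foldl bStep (c, t)).2).keys = PySem.Set.update t.keys (gs.map (fun i => i.2.1)) := by
  induction gs generalizing c t with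
  | nil => exact ⟨fun k => rfl, rfl⟩
  | cons i gs ih =>
    have hpair : ∀ (st : PySem.Dict String Int × PySem.Dict String (PySem.Dict String Int)), st = (st.1, st.2) := fun st => rfl
    simp only [List.foldl_cons]
    rw [hpair (bStep (c, t) i), bStep_fst]
    by_cases h : c.contains i.2.1 = true
    · have ht : t.contains i.2.1 = true := (hinv i.2.1) ▸ h
      rw [bStep_snd_pos _ _ _ h]
      set t' := t.modify i.2.1 PySem.Dict.empty (fun wd => i.2.2.foldl wstepB wd) with ht'
      have hinv' : ∀ j, (cstepF c i).contains j = t'.contains j := by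
        intro j
        rw [cstepF_eq_insert, PySem.Dict.contains_insert, ht', PySem.Dict.contains_modify, hinv]
      obtain ⟨hg, hk⟩ := ih (cstepF c i) t' hinv'
      constructor
      · intro k
        rw [hg k, wordsOf_cons]
        by_cases hk' : i.2.1 = k
        · rw [if_pos hk', List.foldl_append, ht', PySem.Dict.getD_modify, if_pos hk'.symm, hk']
        · rw [if_neg hk', ht', PySem.Dict.getD_modify, if_neg (fun hx => hk' hx.symm)]
      · rw [hk, ht', PySem.Dict.keys_modify, PySem.Dict.keys_insert_of_contains _ _ ht,
          List.map_cons, PySem.Set.update_cons,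
          PySem.Set.add_of_mem ((PySem.Dict.contains_iff_mem_keys t i.2.1).mp ht)]
    · have hc : c.contains i.2.1 = false := by simpa using h
      have ht : t.contains i.2.1 = false := (hinv i.2.1) ▸ hc
      rw [bStep_snd_neg _ _ _ hc]
      set t' := (t.insert i.2.1 PySem.Dict.empty).modify i.2.1 PySem.Dict.empty (fun wd => i.2.2.foldl wstepB wd) with ht'
      have hinv' : ∀ j, (cstepF c i).contains j = t'.contains j := by
        intro j
        rw [cstepF_eq_insert, PySem.Dict.contains_insert, ht', PySem.Dict.contains_modify,
          PySem.Dict.contains_insert, hinv]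
        cases hj : (j == i.2.1) <;> simp
      obtain ⟨hg, hk⟩ := ih (cstepF c i) t' hinv'
      constructor
      · intro k
        rw [hg k, wordsOf_cons]
        by_cases hk' : i.2.1 = k
        · rw [if_pos hk', List.foldl_append, ht', PySem.Dict.getD_modify, if_pos hk'.symm,
            PySem.Dict.getD_insert_self, ← hk', PySem.Dict.getD_of_not_contains t _ ht]
        · rw [if_neg hk', ht', PySem.Dict.getD_modify, if_neg (fun hx => hk' hx.symm),
            PySem.Dict.getD_insert_of_ne _ _ _ (fun hx => hk' hx.symm)]
      · rw [hk, ht', PySem.Dict.keys_modify,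
          PySem.Dict.keys_insert_of_contains _ _ (by rw [PySem.Dict.contains_insert]; simp),
          PySem.Dict.keys_insert_of_not_contains _ _ ht, List.map_cons, PySem.Set.update_cons,
          PySem.Set.add_of_not_mem (fun hm => by
            rw [(PySem.Dict.contains_iff_mem_keys t i.2.1).mpr hm] at ht; simp at ht)]

-- the category dict both sides build, and its keys
theorem cats_keys (gs : List (String × String × List String)) :
    (gs.foldl cstepF PySem.Dict.empty).keys = PySem.Set.ofList (gs.map (fun i => i.2.1)) := by
  have : gs.foldl cstepF PySem.Dict.empty
      = gs.foldl (fun d i => d.insert i.2.1 (if !(d.contains i.2.1) then 1 else d.getD i.2.1 0 + 1)) PySem.Dict.empty := by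
    congr 1; funext d i; exact cstepF_eq_insert d i
  rw [this, PySem.Dict.keys_foldl_insert_key gs (fun i => i.2.1)]
  simp [PySem.Set.update_nil_left]

-- tw0 (deepcopy+reset) : getD is always empty
theorem tw0_getD (l : List (String × Int)) (k : String) :
    (PySem.Dict.mk (l.map (fun p => (p.1, (PySem.Dict.empty : PySem.Dict String Int))))).getD k PySem.Dict.empty
      = PySem.Dict.empty := by
  induction l with
  | nil => rfl
  | cons p l ih =>
    rw [List.map_cons, PySem.Dict.getD_eq_get?_getD, PySem.Dict.get?_mk_cons]
    by_cases h : p.1 == k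
    · simp [h]
    · simp only [h, Bool.false_eq_true, if_false]
      rw [← PySem.Dict.getD_eq_get?_getD, ih]

-- ===== VERDICT (by name: the statement is the Claim_ definition above) =====
theorem Categories_count_spec : Claim_equal_Categories_count := by
  intro gs _
  unfold Spec_Categories_count
  show Categories_count gs = Categories_count_alt gs
  unfold Categories_count Categories_count_alt
  show ((gs.foldl cstepF PySem.Dict.empty).items,
        (gs.foldl (fun t i => i.2.2.foldl (fun t w => t.modify i.2.1 PySem.Dict.empty (fun wd => wstepA wd w)) t)
          (PySem.Dict.mk ((gs.foldl cstepF PySem.Dict.empty).items.map (fun p => (p.1, PySem.Dict.empty))))).items.map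
          (fun p => (p.1, p.2.items)))
      = ((gs.foldl bStep (PySem.Dict.empty, PySem.Dict.empty)).1.items,
         (gs.foldl bStep (PySem.Dict.empty, PySem.Dict.empty)).2.items.map (fun p => (p.1, p.2.items)))
  set cats := gs.foldl cstepF PySem.Dict.empty with hcats
  set tw0 := PySem.Dict.mk (cats.items.map (fun p => (p.1, (PySem.Dict.empty : PySem.Dict String Int)))) with htw0
  set twA := gs.foldl (fun t i => i.2.2.foldl (fun t w => t.modify i.2.1 PySem.Dict.empty (fun wd => wstepA wd w)) t) tw0 with htwA
  set twB := (gs.foldl bStep (PySem.Dict.empty, PySem.Dict.empty)).2 with htwB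
  have htw0keys : tw0.keys = cats.keys := by rw [htw0, PySem.Dict.keys_mk, List.map_map]; rfl
  have hcontains : ∀ i ∈ gs, tw0.contains i.2.1 = true := by
    intro i hi
    rw [PySem.Dict.contains_iff_mem_keys, htw0keys, cats_keys, PySem.Set.mem_ofList]
    exact List.mem_map.mpr ⟨i, hi, rfl⟩
  have hkeysA : twA.keys = PySem.Set.ofList (gs.map (fun i => i.2.1)) := by
    rw [htwA, afold_keys gs tw0 hcontains, htw0keys, cats_keys]
  obtain ⟨hgB, hkB⟩ := bfold_snd gs PySem.Dict.empty PySem.Dict.empty (fun j => rfl)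
  have hkeysB : twB.keys = PySem.Set.ofList (gs.map (fun i => i.2.1)) := by
    rw [htwB, hkB, PySem.Dict.keys_empty, PySem.Set.update_nil_left]
  have hndA : twA.keys.Nodup := by rw [hkeysA]; exact PySem.Set.nodup_ofList _
  have hndB : twB.keys.Nodup := by rw [hkeysB]; exact PySem.Set.nodup_ofList _
  have hgetD : ∀ k, twA.getD k PySem.Dict.empty = twB.getD k PySem.Dict.empty := by
    intro k
    rw [htwA, afold_getD, tw0_getD, htwB, hgB k, PySem.Dict.getD_empty, wstep_eq]
  have hitems : twA.items = twB.items := by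
    rw [PySem.Dict.items_eq_map_keys twA hndA PySem.Dict.empty,
      PySem.Dict.items_eq_map_keys twB hndB PySem.Dict.empty, hkeysA, ← hkeysB]
    exact List.map_congr_left (fun k _ => by rw [hgetD k])
  rw [Prod.ext_iff]
  refine ⟨?_, by rw [hitems]⟩
  show cats.items = (gs.foldl bStep (PySem.Dict.empty, PySem.Dict.empty)).1.items
  rw [bfold_fst, hcats]
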